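-- pv_equiv track=rewrite | github.com/Valmal9201/myprograms | functs.py | repeat101
-- ===== SOURCE A (Python) =====
-- def repeat101(num):
--     i = 1
--     ctr = 0
--     word = ""
--     while i <= num:
--         while ctr < i:
--             if ctr % 2:
--                 word += "0"
--             else:
--                 word += "1"
--             ctr += 1
--         ctr = 0
--         word += "\n"
--         i += 1
--     return word
-- ===== SOURCE B (Python) =====
-- def repeat101(num):
--     base = ("10" * ((num + 1) // 2))[:num]
--     return "".join(base[:i] + "\n" for i in range(1, num + 1))
-- ===== Notes on version B (the rewrite author's own statement) =====
-- stated objective: simpler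
-- what changed: Replaces the nested while loops with modulo-driven per-character string appends by precomputing the alternating pattern once ('10' repeated, truncated to num) and joining its prefixes base[:i] for i in 1..num with str.join.
import Mathlib
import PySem

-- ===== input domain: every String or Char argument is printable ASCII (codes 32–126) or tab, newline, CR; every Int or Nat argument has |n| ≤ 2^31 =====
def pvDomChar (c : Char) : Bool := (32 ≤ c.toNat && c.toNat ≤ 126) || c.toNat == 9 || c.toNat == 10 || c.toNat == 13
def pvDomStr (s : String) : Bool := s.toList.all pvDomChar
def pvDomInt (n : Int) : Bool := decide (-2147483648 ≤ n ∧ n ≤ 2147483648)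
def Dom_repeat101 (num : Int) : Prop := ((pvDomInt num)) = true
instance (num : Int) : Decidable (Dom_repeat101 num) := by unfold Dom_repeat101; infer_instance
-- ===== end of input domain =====

-- B replaces A's nested modulo-driven while loops by one precomputed alternating
-- string whose prefixes are joined; objective: simpler.

-- ===== PORT A =====
-- A builds `word` one character at a time; we carry it as a List Char and wrap
-- String.ofList at the end (Lean's own String ops are opaque to the kernel).

-- inner `while ctr < i` loop of A
def repeat101Inner (i ctr : Int) (word : List Char) : List Char :=
  if _h : ctr < i then
    repeat101Inner i (ctr + 1)
      (word ++ [if PySem.Int.mod ctr 2 ≠ 0 then '0' else '1'])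
  else word
termination_by (i - ctr).toNat
decreasing_by omega

-- outer `while i <= num` loop of A
def repeat101Outer (num i : Int) (word : List Char) : List Char :=
  if _h : i ≤ num then
    repeat101Outer num (i + 1) (repeat101Inner i 0 word ++ ['\n'])
  else word
termination_by (num + 1 - i).toNat
decreasing_by omega

def repeat101 (num : Int) : String :=
  String.ofList (repeat101Outer num 1 [])

-- ===== PORT B =====
-- base = ("10" * ((num + 1) // 2))[:num]  ; Python str*k with k ≤ 0 is "",
-- matched exactly by .toNat on the (possibly negative) repetition count.
-- "".join(base[:i] + "\n" for i in range(1, num + 1))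
def repeat101_alt (num : Int) : String :=
  let base : List Char :=
    PySem.List.slice
      ((List.replicate (PySem.Int.floordiv (num + 1) 2).toNat ['1', '0']).flatten)
      none (some num)
  String.ofList
    (((PySem.List.pyRange 1 (num + 1) 1).map
        (fun i => PySem.List.slice base none (some i) ++ ['\n'])).flatten)

-- ===== PRECONDITION & SPEC =====
def Spec_repeat101 (num : Int) (out : String) : Prop := out = repeat101_alt num
instance (num : Int) (out : String) : Decidable (Spec_repeat101 num out) := by unfold Spec_repeat101; infer_instance

-- ===== CLAIM (what is proved, stated in full; the proofs are below) =====
def Claim_equal_repeat101 : Prop := ∀ (num : Int), Dom_repeat101 num → Spec_repeat101 num (repeat101 num)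

-- ===== LEMMAS AND PROOFS =====

-- the alternating pattern of length n, starting with '1' when b = true
def pvAlt : Nat → Bool → List Char
  | 0, _ => []
  | n + 1, b => (if b then '1' else '0') :: pvAlt n (!b)

theorem pvAlt_take (m n : Nat) (b : Bool) :
    (pvAlt n b).take m = pvAlt (min m n) b := by
  induction n generalizing m b with
  | zero => simp [pvAlt]
  | succ n ih =>
    cases m with
    | zero => simp [pvAlt]
    | succ m => simp [pvAlt, ih, Nat.succ_min_succ]

theorem pvAlt_flatten (K : Nat) :
    (List.replicate K ['1', '0']).flatten = pvAlt (2 * K) true := by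
  induction K with
  | zero => rfl
  | succ K ih =>
    have h2 : 2 * (K + 1) = (2 * K) + 1 + 1 := by omega
    rw [List.replicate_succ, List.flatten_cons, ih, h2]
    rfl

theorem inner_acc (n : Nat) : ∀ (i ctr : Int) (word : List Char),
    (i - ctr).toNat = n → 0 ≤ ctr →
    repeat101Inner i ctr word = word ++ pvAlt n (decide (PySem.Int.mod ctr 2 = 0)) := by
  induction n with
  | zero =>
    intro i ctr word hn _
    rw [repeat101Inner, dif_neg (by omega)]
    simp [pvAlt]
  | succ n ih =>
    intro i ctr word hn hc
    rw [repeat101Inner, dif_pos (by omega)]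
    rw [ih i (ctr + 1) _ (by omega) (by omega)]
    have hmod : PySem.Int.mod ctr 2 = ctr % 2 :=
      PySem.Int.mod_eq_emod_of_pos (by omega)
    have hmod1 : PySem.Int.mod (ctr + 1) 2 = (ctr + 1) % 2 :=
      PySem.Int.mod_eq_emod_of_pos (by omega)
    simp only [pvAlt, List.append_assoc, List.singleton_append]
    congr 1
    rw [hmod, hmod1]
    by_cases h : ctr % 2 = 0
    · simp [h, show (ctr + 1) % 2 ≠ 0 by omega]
    · simp [h, show (ctr + 1) % 2 = 0 by omega]

theorem outer_acc (n : Nat) : ∀ (num i : Int) (word : List Char),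
    (num + 1 - i).toNat = n → 0 ≤ i →
    repeat101Outer num i word =
      word ++ ((List.range n).map
        (fun (k : Nat) => pvAlt (i + (k : Int)).toNat true ++ ['\n'])).flatten := by
  induction n with
  | zero =>
    intro num i word hn _
    rw [repeat101Outer, dif_neg (by omega)]
    simp
  | succ n ih =>
    intro num i word hn hi
    rw [repeat101Outer, dif_pos (by omega)]
    rw [inner_acc i.toNat i 0 word (by omega) (by omega)]
    rw [ih num (i + 1) _ (by omega) (by omega)]
    rw [List.range_succ_eq_map]
    simp only [List.map_cons, List.map_map, List.flatten_cons, List.append_assoc,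
      List.singleton_append]
    have hm0 : (decide (PySem.Int.mod 0 2 = 0)) = true := by decide
    rw [hm0]
    congr 2
    · congr 1
      omega
    · refine congrArg (List.cons '\n') (congrArg List.flatten (List.map_congr_left ?_))
      intro k _
      simp only [Function.comp]
      congr 2
      omega

theorem take_base (m K : Nat) (hm : m ≤ 2 * K) :
    ((List.replicate K ['1', '0']).flatten).take m = pvAlt m true := by
  rw [pvAlt_flatten, pvAlt_take, Nat.min_eq_left hm]

-- ===== VERDICT (by name: the statement is the Claim_ definition above) =====
theorem repeat101_spec : Claim_equal_repeat101 := by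
  unfold Claim_equal_repeat101
  intro num _
  unfold Spec_repeat101 repeat101 repeat101_alt
  by_cases hneg : 0 ≤ num
  case neg =>
    rw [outer_acc 0 num 1 [] (by omega) (by omega),
        PySem.List.pyRange_one_eq_nil (by omega)]
    simp
  case pos =>
    rw [outer_acc num.toNat num 1 [] (by omega) (by omega)]
    rw [PySem.List.pyRange_one]
    rw [PySem.List.slice_to _ hneg]
    have hfd : PySem.Int.floordiv (num + 1) 2 = (num + 1) / 2 :=
      PySem.Int.floordiv_eq_ediv_of_pos (by omega)
    have hnK : num.toNat ≤ 2 * (PySem.Int.floordiv (num + 1) 2).toNat := by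
      rw [hfd]; omega
    simp only [List.nil_append, show (num + 1 - 1 : Int) = num by ring, List.map_map]
    congr 1
    refine congrArg List.flatten (List.map_congr_left ?_)
    intro k hk
    simp only [List.mem_range] at hk
    simp only [Function.comp]
    rw [PySem.List.slice_to _ (by omega : (0:Int) ≤ 1 + (k : Int))]
    rw [List.take_take]
    have h1 : ((1 : Int) + (k : Int)).toNat = k + 1 := by omega
    rw [h1, Nat.min_eq_left (by omega)]
    rw [take_base (k + 1) _ (by omega)]
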